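-- pv_equiv track=rewrite | github.com/Melodiz/CodeRun | CodeRun_Boost/7509_danger_core/solution.py | calculate_answer
-- ===== SOURCE A (Python) =====
-- def calculate_mex_from_range(a: list[int], start: int, end: int) -> int:
--     if start > end:
--         return 0
--
--     length = end - start + 1
--     seen = [False] * (length + 1)
--     for i in range(start, end + 1):
--         val = a[i]
--         if 0 <= val < len(seen):
--             seen[val] = True
--
--     mex = 0
--     while mex < len(seen) and seen[mex]:
--         mex += 1
--     return mex
--
-- def check(V: int, n: int, a: list[int]) -> bool:
--     l0, r0 = -1, -1
--     for i in range(n):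
--         if a[i] > V:
--             if l0 == -1:
--                 l0 = i
--             r0 = i
--
--     if l0 == -1:  # Case 1: All elements in `a` are <= V.
--         has_non_zero = False
--         for x in a:
--             if x != 0:
--                 has_non_zero = True
--                 break
--
--         if has_non_zero:
--             return True
--         else:
--             return V >= 1
--     else:  # Case 2: Some elements in `a` are > V.
--         m = calculate_mex_from_range(a, l0, r0)
--         return m <= V
--
-- def calculate_answer(n: int, a: list[int]) -> list[int]:
--     if n == 1:
--         m = 1 if a[0] == 0 else 0
--         return [m, m, m, m]
--
--     mex_a = calculate_mex_from_range(a, 0, n - 1)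
--     max_a = max(a) if a else 0
--
--     # --- 1. minMax (with corrected check function) ---
--     low, high = 0, n
--     minMax = n
--     while low <= high:
--         mid = (low + high) // 2
--         if check(mid, n, a):
--             minMax = mid
--             high = mid - 1
--         else:
--             low = mid + 1
--
--     # --- 2. maxMax ---
--     maxMax = max(max_a, mex_a)
--
--     # --- 3. minMin ---
--     minMin = 0
--
--     # --- 4. maxMin ---
--     maxMin = mex_a
--
--     return [minMax, maxMax, minMin, maxMin]
-- ===== SOURCE B (Python) =====
-- def calculate_mex_from_range(a: list[int], start: int, end: int) -> int:
--     if start > end: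
--         return 0
--
--     length = end - start + 1
--     seen = [False] * (length + 1)
--     for i in range(start, end + 1):
--         val = a[i]
--         if 0 <= val < len(seen):
--             seen[val] = True
--
--     mex = 0
--     while mex < len(seen) and seen[mex]:
--         mex += 1
--     return mex
--
-- def check(V: int, n: int, a: list[int]) -> bool:
--     l0, r0 = -1, -1
--     for i in range(n):
--         if a[i] > V:
--             if l0 == -1:
--                 l0 = i
--             r0 = i
--
--     if l0 == -1:  # All elements in `a` are <= V.
--         has_non_zero = False
--         for x in a:
--             if x != 0:
--                 has_non_zero = True
--                 break
--
--         if has_non_zero: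
--             return True
--         else:
--             return V >= 1
--     else:  # Some elements in `a` are > V.
--         m = calculate_mex_from_range(a, l0, r0)
--         return m <= V
--
-- def calculate_answer(n: int, a: list[int]) -> list[int]:
--     if n == 1:
--         m = 1 if a[0] == 0 else 0
--         return [m, m, m, m]
--
--     mex_a = calculate_mex_from_range(a, 0, n - 1)
--     max_a = max(a) if a else 0
--
--     # minMax: check(V) is monotone in V, so the least passing V is found by a
--     # single forward scan instead of a binary search.
--     minMax = next((v for v in range(n + 1) if check(v, n, a)), n)
--
--     return [minMax, max(max_a, mex_a), 0, mex_a]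
-- ===== Notes on version B (the rewrite author's own statement) =====
-- stated objective: simpler
-- what changed: The binary search for minMax (low/high/mid loop mutating three variables) is replaced by a single forward scan returning the first V in 0..n that passes check (valid because check is monotone in V); the helpers and the other three outputs are unchanged, and the scan stops at the answer, which is small on typical inputs, so it runs fewer expensive check calls than the binary search's log n probes at large mid values.
import Mathlib
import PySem

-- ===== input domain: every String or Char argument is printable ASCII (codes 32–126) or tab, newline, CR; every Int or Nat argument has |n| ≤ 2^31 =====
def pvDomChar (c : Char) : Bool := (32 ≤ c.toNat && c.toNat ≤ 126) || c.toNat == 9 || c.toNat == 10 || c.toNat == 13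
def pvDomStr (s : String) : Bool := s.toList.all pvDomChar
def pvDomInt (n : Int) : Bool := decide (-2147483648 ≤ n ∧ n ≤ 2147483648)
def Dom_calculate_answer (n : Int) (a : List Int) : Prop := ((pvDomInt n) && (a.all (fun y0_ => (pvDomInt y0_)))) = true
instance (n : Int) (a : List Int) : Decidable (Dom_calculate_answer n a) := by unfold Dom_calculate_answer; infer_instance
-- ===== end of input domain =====

-- B replaces A's binary search for minMax by a forward scan for the first V passing check
-- (valid because check is monotone in V); helpers and the other outputs are unchanged. Objective: simpler.

-- ===== PORT A =====
-- while mex < len(seen) and seen[mex]: mex += 1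
def mexLoop (seen : List Bool) (mex : Nat) : Nat :=
  if mex < seen.length ∧ seen.getD mex false = true then mexLoop seen (mex + 1) else mex
  termination_by seen.length - mex
  decreasing_by omega

def calculate_mex_from_range (a : List Int) (start end_ : Int) : Int :=
  if start > end_ then 0
  else
    let length := end_ - start + 1
    let seen := (PySem.List.pyRange start (end_ + 1) 1).foldl
      (fun s i =>
        let val := (PySem.List.pyGet? a i).getD 0
        if 0 ≤ val ∧ val < (s.length : Int) then s.set val.toNat true else s)
      (List.replicate (length + 1).toNat false)
    ((mexLoop seen 0 : Nat) : Int)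

def check (V n : Int) (a : List Int) : Bool :=
  let lr := (PySem.List.pyRange 0 n 1).foldl
    (fun (p : Int × Int) i =>
      if (PySem.List.pyGet? a i).getD 0 > V then
        (if p.1 = -1 then i else p.1, i)
      else p)
    (-1, -1)
  if lr.1 = -1 then
    -- Case 1: all elements of a are <= V
    let has_non_zero := a.any (fun x => x ≠ 0)
    if has_non_zero then true else decide (V ≥ 1)
  else
    -- Case 2: some elements of a are > V
    decide (calculate_mex_from_range a lr.1 lr.2 ≤ V)

def binLoop (n : Int) (a : List Int) (low high minMax : Int) : Int :=
  if low ≤ high then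
    let mid := PySem.Int.floordiv (low + high) 2
    if check mid n a then binLoop n a low (mid - 1) mid
    else binLoop n a (mid + 1) high minMax
  else minMax
  termination_by (high - low + 1).toNat
  decreasing_by
  · have := PySem.Int.floordiv_two_mid_bounds (lo := low) (hi := high) (by omega)
    omega
  · have := PySem.Int.floordiv_two_mid_bounds (lo := low) (hi := high) (by omega)
    omega

def calculate_answer (n : Int) (a : List Int) : List Int :=
  if n = 1 then
    let m : Int := if (PySem.List.pyGet? a 0).getD 0 = 0 then 1 else 0
    [m, m, m, m]
  else
    let mex_a := calculate_mex_from_range a 0 (n - 1)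
    let max_a := if a ≠ [] then (PySem.List.max? a (fun x => x)).getD 0 else 0
    let minMax := binLoop n a 0 n n
    [minMax, max max_a mex_a, 0, mex_a]

-- ===== PORT B =====
-- Source B keeps the same helpers calculate_mex_from_range / check (shared definitions above);
-- only the computation of minMax differs: first passing V of a forward scan (next(...) over range(n+1)).
def calculate_answer_alt (n : Int) (a : List Int) : List Int :=
  if n = 1 then
    let m : Int := if (PySem.List.pyGet? a 0).getD 0 = 0 then 1 else 0
    [m, m, m, m]
  else
    let mex_a := calculate_mex_from_range a 0 (n - 1)
    let max_a := if a ≠ [] then (PySem.List.max? a (fun x => x)).getD 0 else 0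
    let minMax := ((PySem.List.pyRange 0 (n + 1) 1).find? (fun v => check v n a)).getD n
    [minMax, max max_a mex_a, 0, mex_a]

-- ===== PRECONDITION & SPEC =====
-- Pre excludes exactly the inputs where the Python A raises IndexError: n > len(a)
-- (check and the n == 1 branch index a[i] for i < n).
def Pre_calculate_answer (n : Int) (a : List Int) : Prop := n ≤ (a.length : Int)
instance (n : Int) (a : List Int) : Decidable (Pre_calculate_answer n a) := by
  unfold Pre_calculate_answer; infer_instance

def pvWitness_calculate_answer : Int × List Int := (3, [1, 0, 2])

def Spec_calculate_answer (n : Int) (a : List Int) (out : List Int) : Prop := out = calculate_answer_alt n a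
instance (n : Int) (a : List Int) (out : List Int) : Decidable (Spec_calculate_answer n a out) := by unfold Spec_calculate_answer; infer_instance

-- ===== CLAIM (what is proved, stated in full; the proofs are below) =====
def Claim_equal_calculate_answer : Prop := ∀ (n : Int) (a : List Int), Dom_calculate_answer n a → Pre_calculate_answer n a → Spec_calculate_answer n a (calculate_answer n a)

-- ===== LEMMAS AND PROOFS =====

-- exceed predicate and the (l0, r0) fold of check
def pvEx (V : Int) (a : List Int) (i : Int) : Prop := (PySem.List.pyGet? a i).getD 0 > V

def pvLR (V : Int) (a : List Int) (n : Int) : Int × Int :=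
  (PySem.List.pyRange 0 n 1).foldl
    (fun (p : Int × Int) i =>
      if (PySem.List.pyGet? a i).getD 0 > V then
        (if p.1 = -1 then i else p.1, i)
      else p)
    (-1, -1)

theorem check_eq_lr (V n : Int) (a : List Int) :
    check V n a =
      (if (pvLR V a n).1 = -1 then
        (if a.any (fun x => x ≠ 0) then true else decide (V ≥ 1))
      else decide (calculate_mex_from_range a (pvLR V a n).1 (pvLR V a n).2 ≤ V)) := rfl

theorem pyRange_nil (lo b : Int) (h : b ≤ lo) : PySem.List.pyRange lo b = [] := by
  refine List.eq_nil_iff_forall_not_mem.mpr ?_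
  intro x hx; rw [PySem.List.mem_pyRange_one] at hx; omega

def pvLRSpec (V : Int) (a : List Int) (n : Int) (p : Int × Int) : Prop :=
  (p = (-1, -1) ∧ ∀ i, 0 ≤ i → i < n → ¬ pvEx V a i) ∨
  (0 ≤ p.1 ∧ p.1 ≤ p.2 ∧ p.2 < n ∧ pvEx V a p.1 ∧ pvEx V a p.2 ∧
    (∀ i, 0 ≤ i → i < p.1 → ¬ pvEx V a i) ∧
    (∀ i, p.2 < i → i < n → ¬ pvEx V a i))

theorem lr_char_nat (V : Int) (a : List Int) (N : Nat) : pvLRSpec V a (N : Int) (pvLR V a (N : Int)) := by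
  induction N with
  | zero =>
    left
    constructor
    · simp [pvLR, pyRange_nil 0 0 le_rfl]
    · intro i h1 h2; omega
  | succ N ih =>
    have hfold : pvLR V a ((N : Int) + 1) =
        (if (PySem.List.pyGet? a (N : Int)).getD 0 > V then
          (if (pvLR V a (N : Int)).1 = -1 then (N : Int) else (pvLR V a (N : Int)).1, (N : Int))
        else pvLR V a (N : Int)) := by
      unfold pvLR
      rw [PySem.List.pyRange_one_succ_right (by positivity), List.foldl_append]
      rfl
    have hcast : ((N + 1 : Nat) : Int) = (N : Int) + 1 := by push_cast; ring
    rw [pvLRSpec, hcast, hfold]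
    by_cases hex : (PySem.List.pyGet? a (N : Int)).getD 0 > V
    · rw [if_pos hex]
      rcases ih with ⟨hp, hnone⟩ | ⟨h1, h2, h3, h4, h5, h6, h7⟩
      · right
        rw [hp]
        have hred : (if ((-1 : Int), (-1 : Int)).1 = -1 then (N : Int) else ((-1 : Int), (-1 : Int)).1, (N : Int)) = ((N : Int), (N : Int)) := by norm_num
        rw [hred]
        refine ⟨by positivity, le_rfl, by omega, hex, hex, ?_, ?_⟩
        · intro i hi1 hi2
          exact hnone i hi1 (by simpa using hi2)
        · intro i hi1 hi2; simp at hi1; omega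
      · right
        have hne : (pvLR V a (N : Int)).1 ≠ -1 := by omega
        rw [if_neg hne]
        refine ⟨h1, by simpa using (by omega : (pvLR V a (N:Int)).1 ≤ (N:Int)), by omega, h4, hex, ?_, ?_⟩
        · intro i hi1 hi2; exact h6 i hi1 (by simpa using hi2)
        · intro i hi1 hi2; simp at hi1; omega
    · rw [if_neg hex]
      rcases ih with ⟨hp, hnone⟩ | ⟨h1, h2, h3, h4, h5, h6, h7⟩
      · left
        refine ⟨hp, ?_⟩
        intro i hi1 hi2
        by_cases hiN : i = (N : Int)
        · subst hiN; simpa [pvEx] using hex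
        · exact hnone i hi1 (by omega)
      · right
        refine ⟨h1, h2, by omega, h4, h5, h6, ?_⟩
        intro i hi1 hi2
        by_cases hiN : i = (N : Int)
        · subst hiN; simpa [pvEx] using hex
        · exact h7 i hi1 (by omega)

theorem lr_char (V : Int) (a : List Int) (n : Int) : pvLRSpec V a n (pvLR V a n) := by
  by_cases h : n ≤ 0
  · left
    constructor
    · simp [pvLR, pyRange_nil 0 n h]
    · intro i h1 h2; omega
  · have hn : n = (n.toNat : Int) := by omega
    rw [hn]
    exact lr_char_nat V a n.toNat
theorem mexLoop_true_below (seen : List Bool) (m : Nat) :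
    ∀ j, m ≤ j → j < mexLoop seen m → (j < seen.length ∧ seen.getD j false = true) := by
  fun_induction mexLoop seen m with
  | case1 m h ih =>
    intro j h1 h2
    by_cases hj : j = m
    · subst hj; exact h
    · exact ih j (by omega) h2
  | case2 m h => intro j h1 h2; omega

theorem mexLoop_stop (seen : List Bool) (m : Nat) :
    ¬(mexLoop seen m < seen.length ∧ seen.getD (mexLoop seen m) false = true) := by
  fun_induction mexLoop seen m with
  | case1 m h ih => exact ih
  | case2 m h => exact h

def pvSeen (a : List Int) (start end_ : Int) : List Bool :=
  (PySem.List.pyRange start (end_ + 1) 1).foldl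
    (fun s i =>
      let val := (PySem.List.pyGet? a i).getD 0
      if 0 ≤ val ∧ val < (s.length : Int) then s.set val.toNat true else s)
    (List.replicate ((end_ - start + 1) + 1).toNat false)

theorem mexRange_eq (a : List Int) (start end_ : Int) (h : start ≤ end_) :
    calculate_mex_from_range a start end_ = ((mexLoop (pvSeen a start end_) 0 : Nat) : Int) := by
  rw [calculate_mex_from_range, if_neg (by omega)]
  rfl

theorem seen_foldl_length (a : List Int) : ∀ (I : List Int) (s : List Bool),
    (I.foldl (fun s i =>
      let val := (PySem.List.pyGet? a i).getD 0
      if 0 ≤ val ∧ val < (s.length : Int) then s.set val.toNat true else s) s).length = s.length := by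
  intro I
  induction I with
  | nil => intro s; rfl
  | cons i I ih =>
    intro s
    rw [List.foldl_cons, ih]
    dsimp only
    split <;> simp

theorem seen_foldl_getD (a : List Int) : ∀ (I : List Int) (s : List Bool) (k : Nat),
    ((I.foldl (fun s i =>
      let val := (PySem.List.pyGet? a i).getD 0
      if 0 ≤ val ∧ val < (s.length : Int) then s.set val.toNat true else s) s).getD k false = true ↔
      (s.getD k false = true ∨
        ∃ i ∈ I, (PySem.List.pyGet? a i).getD 0 = (k : Int) ∧ (k : Int) < (s.length : Int))) := by
  intro I
  induction I with
  | nil => intro s k; simp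
  | cons i I ih =>
    intro s k
    rw [List.foldl_cons, ih]
    have hlen : (if 0 ≤ (PySem.List.pyGet? a i).getD 0 ∧ (PySem.List.pyGet? a i).getD 0 < (s.length : Int)
        then s.set ((PySem.List.pyGet? a i).getD 0).toNat true else s).length = s.length := by
      split <;> simp
    dsimp only
    rw [hlen]
    constructor
    · rintro (hd | ⟨j, hj, hv, hk⟩)
      · -- getD of the step list is true
        by_cases hc : 0 ≤ (PySem.List.pyGet? a i).getD 0 ∧ (PySem.List.pyGet? a i).getD 0 < (s.length : Int)
        · rw [if_pos hc] at hd
          rw [List.getD_eq_getElem?_getD, List.getElem?_set] at hd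
          by_cases he : ((PySem.List.pyGet? a i).getD 0).toNat = k
          · right
            exact ⟨i, by simp, by omega, by omega⟩
          · rw [if_neg he] at hd
            left; rwa [List.getD_eq_getElem?_getD]
        · rw [if_neg hc] at hd
          left; exact hd
      · right; exact ⟨j, by simp [hj], hv, hk⟩
    · rintro (hd | ⟨j, hj, hv, hk⟩)
      · -- s.getD k = true persists through the step
        by_cases hc : 0 ≤ (PySem.List.pyGet? a i).getD 0 ∧ (PySem.List.pyGet? a i).getD 0 < (s.length : Int)
        · rw [if_pos hc]
          left
          rw [List.getD_eq_getElem?_getD, List.getElem?_set]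
          by_cases he : ((PySem.List.pyGet? a i).getD 0).toNat = k
          · rw [if_pos he, if_pos (by omega)]; rfl
          · rw [if_neg he, ← List.getD_eq_getElem?_getD]; exact hd
        · rw [if_neg hc]; left; exact hd
      · rcases List.mem_cons.mp hj with hji | hji
        · subst hji
          left
          rw [if_pos ⟨by omega, by omega⟩]
          rw [List.getD_eq_getElem?_getD, List.getElem?_set, if_pos (by omega), if_pos (by omega)]
          rfl
        · right; exact ⟨j, hji, hv, hk⟩

def pvSeenP (a : List Int) (start end_ k : Int) : Prop :=
  0 ≤ k ∧ k < end_ - start + 2 ∧ ∃ i, start ≤ i ∧ i ≤ end_ ∧ (PySem.List.pyGet? a i).getD 0 = k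

theorem pvSeen_length (a : List Int) (start end_ : Int) (h : start ≤ end_) :
    ((pvSeen a start end_).length : Int) = end_ - start + 2 := by
  rw [pvSeen, seen_foldl_length, List.length_replicate]
  omega

theorem pvSeen_getD (a : List Int) (start end_ : Int) (h : start ≤ end_) (j : Nat) :
    ((pvSeen a start end_).getD j false = true ↔ pvSeenP a start end_ (j : Int)) := by
  rw [pvSeen, seen_foldl_getD, List.length_replicate]
  have hbase : (List.replicate ((end_ - start + 1) + 1).toNat false).getD j false = false := by
    rw [List.getD_eq_getElem?_getD, List.getElem?_replicate]
    split <;> rfl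
  rw [hbase]
  simp only [Bool.false_eq_true, false_or]
  constructor
  · rintro ⟨i, hmem, hv, hk⟩
    rw [PySem.List.mem_pyRange_one] at hmem
    exact ⟨by positivity, by omega, i, hmem.1, by omega, hv⟩
  · rintro ⟨h0, hcap, i, hi1, hi2, hv⟩
    exact ⟨i, PySem.List.mem_pyRange_one.mpr ⟨hi1, by omega⟩, hv, by omega⟩

theorem mex_char (a : List Int) (start end_ : Int) (h : start ≤ end_) :
    0 ≤ calculate_mex_from_range a start end_ ∧
    (∀ k : Int, 0 ≤ k → k < calculate_mex_from_range a start end_ → pvSeenP a start end_ k) ∧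
    ¬ pvSeenP a start end_ (calculate_mex_from_range a start end_) := by
  rw [mexRange_eq a start end_ h]
  refine ⟨by positivity, ?_, ?_⟩
  · intro k hk0 hklt
    have hj : (k.toNat : Int) = k := by omega
    have hjlt : k.toNat < mexLoop (pvSeen a start end_) 0 := by omega
    obtain ⟨hlen, hgd⟩ := mexLoop_true_below (pvSeen a start end_) 0 k.toNat (Nat.zero_le _) hjlt
    rw [pvSeen_getD a start end_ h] at hgd
    rwa [hj] at hgd
  · intro hP
    apply mexLoop_stop (pvSeen a start end_) 0
    constructor
    · have := pvSeen_length a start end_ h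
      have hcap := hP.2.1
      omega
    · rw [pvSeen_getD a start end_ h]
      exact hP

theorem mex_mono (a : List Int) (s s' e' e : Int) (h1 : s ≤ s') (h2 : s' ≤ e') (h3 : e' ≤ e) :
    calculate_mex_from_range a s' e' ≤ calculate_mex_from_range a s e := by
  have hse : s ≤ e := le_trans h1 (le_trans h2 h3)
  obtain ⟨hc, _, hb⟩ := mex_char a s e hse
  obtain ⟨_, ha', _⟩ := mex_char a s' e' h2
  by_contra hlt
  rw [not_le] at hlt
  obtain ⟨h0, hcap, i, hi1, hi2, hv⟩ := ha' _ hc hlt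
  exact hb ⟨h0, by omega, i, by omega, by omega, hv⟩

theorem check_mono (V n : Int) (a : List Int) (hV : 0 ≤ V) (hch : check V n a = true) :
    check (V + 1) n a = true := by
  rw [check_eq_lr] at *
  rcases lr_char (V + 1) a n with ⟨hp', hnone'⟩ | ⟨h1', h2', h3', h4', h5', h6', h7'⟩
  · -- lr(V+1) = (-1,-1): trivially true since V+1 ≥ 1
    rw [hp']
    rw [if_pos (show ((-1 : Int), (-1 : Int)).1 = -1 from rfl)]
    split
    · rfl
    · simp only [decide_eq_true_eq]
      omega
  · -- lr(V+1) is a genuine window; then lr(V) is one too and it contains it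
    rw [if_neg (by omega)]
    rcases lr_char V a n with ⟨hp, hnone⟩ | ⟨h1, h2, h3, h4, h5, h6, h7⟩
    · exfalso
      exact hnone _ h1' (by omega) (by unfold pvEx; unfold pvEx at h4'; omega)
    · rw [if_neg (by omega)] at hch
      simp only [decide_eq_true_eq] at hch ⊢
      have hex' : pvEx V a (pvLR (V + 1) a n).1 := by unfold pvEx at h4' ⊢; omega
      have hex2' : pvEx V a (pvLR (V + 1) a n).2 := by unfold pvEx at h5' ⊢; omega
      have hll : (pvLR V a n).1 ≤ (pvLR (V + 1) a n).1 := by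
        by_contra hco
        exact h6 _ h1' (by omega) hex'
      have hrr : (pvLR (V + 1) a n).2 ≤ (pvLR V a n).2 := by
        by_contra hco
        exact h7 _ (by omega) h3' hex2'
      have := mex_mono a (pvLR V a n).1 (pvLR (V + 1) a n).1 (pvLR (V + 1) a n).2 (pvLR V a n).2 hll h2' hrr
      omega

theorem check_up (n : Int) (a : List Int) : ∀ (u v : Int), 0 ≤ u → u ≤ v → check u n a = true → check v n a = true := by
  have key : ∀ (K : Nat) (u v : Int), (v - u).toNat ≤ K → 0 ≤ u → u ≤ v → check u n a = true → check v n a = true := by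
    intro K
    induction K with
    | zero => intro u v hK h0 huv hc; have : u = v := by omega
              rwa [← this]
    | succ K ih =>
      intro u v hK h0 huv hc
      by_cases he : u = v
      · rwa [← he]
      · exact ih (u + 1) v (by omega) (by omega) (by omega) (check_mono u n a h0 hc)
  intro u v h0 huv hc
  exact key (v - u).toNat u v le_rfl h0 huv hc

theorem find_pyRange_some (p : Int → Bool) :
    ∀ (K : Nat) (lo hi v : Int), (hi - lo).toNat ≤ K →
      (PySem.List.pyRange lo hi 1).find? p = some v →
      lo ≤ v ∧ v < hi ∧ p v = true ∧ ∀ u, lo ≤ u → u < v → p u = false := by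
  intro K
  induction K with
  | zero =>
    intro lo hi v hK hf
    rw [pyRange_nil lo hi (by omega)] at hf
    simp at hf
  | succ K ih =>
    intro lo hi v hK hf
    by_cases hlt : lo < hi
    · rw [PySem.List.pyRange_one_cons hlt, List.find?_cons] at hf
      by_cases hp : p lo = true
      · rw [hp] at hf
        obtain rfl : lo = v := Option.some.inj hf
        exact ⟨le_rfl, hlt, hp, fun u hu1 hu2 => by omega⟩
      · rw [Bool.not_eq_true] at hp
        rw [hp] at hf
        obtain ⟨hv1, hv2, hv3, hv4⟩ := ih (lo + 1) hi v (by omega) hf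
        refine ⟨by omega, hv2, hv3, ?_⟩
        intro u hu1 hu2
        by_cases hu : u = lo
        · subst hu; simpa using hp
        · exact hv4 u (by omega) hu2
    · rw [pyRange_nil lo hi (by omega)] at hf
      simp at hf

theorem binLoop_step (n : Int) (a : List Int) (low high m : Int) (h : low ≤ high) :
    binLoop n a low high m =
      (if check (PySem.Int.floordiv (low + high) 2) n a
        then binLoop n a low (PySem.Int.floordiv (low + high) 2 - 1) (PySem.Int.floordiv (low + high) 2)
        else binLoop n a (PySem.Int.floordiv (low + high) 2 + 1) high m) := by
  rw [binLoop, if_pos h]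

theorem binLoop_stop (n : Int) (a : List Int) (low high m : Int) (h : ¬ low ≤ high) :
    binLoop n a low high m = m := by
  rw [binLoop, if_neg h]

theorem binLoop_all_false (n : Int) (a : List Int)
    (hall : ∀ v, 0 ≤ v → v ≤ n → check v n a = false) :
    ∀ (K : Nat) (low high m : Int), (high - low + 1).toNat ≤ K → 0 ≤ low → high ≤ n →
      binLoop n a low high m = m := by
  intro K
  induction K with
  | zero =>
    intro low high m hK h0 hn
    exact binLoop_stop n a low high m (by omega)
  | succ K ih =>
    intro low high m hK h0 hn
    by_cases hlh : low ≤ high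
    · obtain ⟨hm1, hm2⟩ := PySem.Int.floordiv_two_mid_bounds hlh
      rw [binLoop_step n a low high m hlh]
      rw [if_neg (by rw [hall _ (by omega) (by omega)]; simp)]
      exact ih _ high m (by omega) (by omega) hn
    · exact binLoop_stop n a low high m hlh

theorem binLoop_found (n : Int) (a : List Int) (F : Int) (hF0 : 0 ≤ F) (hFP : check F n a = true)
    (hS1 : ∀ v, 0 ≤ v → v < F → check v n a = false) :
    ∀ (K : Nat) (low high m : Int), (high - low + 1).toNat ≤ K → 0 ≤ low → low ≤ F →
      (m = F ∨ F ≤ high) → binLoop n a low high m = F := by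
  intro K
  induction K with
  | zero =>
    intro low high m hK h0 hlF hd
    rcases hd with rfl | hFh
    · exact binLoop_stop n a low high _ (by omega)
    · omega
  | succ K ih =>
    intro low high m hK h0 hlF hd
    by_cases hlh : low ≤ high
    · obtain ⟨hm1, hm2⟩ := PySem.Int.floordiv_two_mid_bounds hlh
      rw [binLoop_step n a low high m hlh]
      by_cases hc : check (PySem.Int.floordiv (low + high) 2) n a = true
      · rw [if_pos hc]
        have hFmid : F ≤ PySem.Int.floordiv (low + high) 2 := by
          by_contra hco
          rw [not_le] at hco
          have := hS1 _ (by omega) hco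
          rw [hc] at this
          exact absurd this (by simp)
        exact ih low _ _ (by omega) h0 hlF (by omega)
      · rw [if_neg hc]
        have hmidF : PySem.Int.floordiv (low + high) 2 < F := by
          by_contra hco
          rw [not_lt] at hco
          exact hc (check_up n a F _ hF0 hco hFP)
        exact ih _ high m (by omega) (by omega) (by omega) hd
    · rcases hd with rfl | hFh
      · exact binLoop_stop n a low high _ hlh
      · omega

-- ===== VERDICT (by name: the statement is the Claim_ definition above) =====
theorem calculate_answer_spec : Claim_equal_calculate_answer := by
  unfold Claim_equal_calculate_answer
  intro n a hdom hpre
  unfold Spec_calculate_answer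
  unfold calculate_answer calculate_answer_alt
  by_cases h1 : n = 1
  · rw [if_pos h1, if_pos h1]
  · rw [if_neg h1, if_neg h1]
    have hmm : binLoop n a 0 n n = ((PySem.List.pyRange 0 (n + 1) 1).find? (fun v => check v n a)).getD n := by
      cases hf : (PySem.List.pyRange 0 (n + 1) 1).find? (fun v => check v n a) with
      | none =>
        have hall : ∀ v, 0 ≤ v → v ≤ n → check v n a = false := by
          intro v h0 hvn
          have := List.find?_eq_none.mp hf v (PySem.List.mem_pyRange_one.mpr ⟨h0, by omega⟩)
          simpa using this
        rw [Option.getD_none]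
        exact binLoop_all_false n a hall ((n - 0 + 1).toNat) 0 n n le_rfl le_rfl le_rfl
      | some v =>
        obtain ⟨hv1, hv2, hv3, hv4⟩ := find_pyRange_some (fun v => check v n a) ((n + 1 - 0).toNat) 0 (n + 1) v le_rfl hf
        rw [Option.getD_some]
        exact binLoop_found n a v hv1 hv3 hv4 ((n - 0 + 1).toNat) 0 n n le_rfl le_rfl hv1 (Or.inr (by omega))
    rw [hmm]
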